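-- pv_equiv track=rewrite | github.com/rsen-pattern/Collection-Page-Content-Writter | core/priority_scorer.py | score_striking_distance
-- ===== SOURCE A (Python) =====
-- from typing import Optional
--
-- def score_striking_distance(best_rank: Optional[int], ranks: list[Optional[int]]) -> int:
--     """Score based on striking distance keywords (positions 8-17 highest priority)."""
--     all_ranks = [r for r in ([best_rank] + ranks) if r is not None]
--     if not all_ranks:
--         return 1
--
--     has_8_to_17 = any(8 <= r <= 17 for r in all_ranks)
--     has_18_to_25 = any(18 <= r <= 25 for r in all_ranks)
--
--     if has_8_to_17:
--         return 3
--     elif has_18_to_25: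
--         return 2
--     return 1
-- ===== SOURCE B (Python) =====
-- from typing import Optional
--
-- def _rank_score(r: int) -> int:
--     if 8 <= r <= 17:
--         return 3
--     if 18 <= r <= 25:
--         return 2
--     return 1
--
-- def score_striking_distance(best_rank: Optional[int], ranks: list[Optional[int]]) -> int:
--     return max((_rank_score(r) for r in [best_rank] + ranks if r is not None), default=1)
-- ===== Notes on version B (the rewrite author's own statement) =====
-- stated objective: simpler
-- what changed: Replaced the empty-check plus two separate any() range scans and the if/elif ladder with a single pass mapping each rank to its priority score (3/2/1) and taking the max with default 1.
import Mathlib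
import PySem

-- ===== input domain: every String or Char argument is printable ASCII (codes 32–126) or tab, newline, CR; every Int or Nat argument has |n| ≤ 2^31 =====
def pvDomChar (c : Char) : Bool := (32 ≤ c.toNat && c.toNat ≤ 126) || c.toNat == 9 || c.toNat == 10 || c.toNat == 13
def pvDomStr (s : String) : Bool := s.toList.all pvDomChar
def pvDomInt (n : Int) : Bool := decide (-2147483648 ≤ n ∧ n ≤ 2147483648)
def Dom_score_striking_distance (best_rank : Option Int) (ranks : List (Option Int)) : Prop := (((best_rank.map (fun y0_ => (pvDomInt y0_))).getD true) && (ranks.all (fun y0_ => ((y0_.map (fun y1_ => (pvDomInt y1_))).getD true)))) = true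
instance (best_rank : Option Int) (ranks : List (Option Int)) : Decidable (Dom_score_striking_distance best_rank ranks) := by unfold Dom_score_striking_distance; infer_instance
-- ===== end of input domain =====

-- ===== PORT A =====
-- Literal port of A: filter out none, empty check, two any-scans, if/elif ladder.
def score_striking_distance (best_rank : Option Int) (ranks : List (Option Int)) : Int :=
  let all_ranks := (best_rank :: ranks).filterMap id
  if all_ranks = [] then 1
  else
    let has_8_to_17 := all_ranks.any (fun r => decide (8 ≤ r ∧ r ≤ 17))
    let has_18_to_25 := all_ranks.any (fun r => decide (18 ≤ r ∧ r ≤ 25))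
    if has_8_to_17 then 3
    else if has_18_to_25 then 2
    else 1

-- ===== PORT B =====
-- Port of B: map each present rank to its score 3/2/1 and fold max with default 1.
def rankScore (r : Int) : Int :=
  if 8 ≤ r ∧ r ≤ 17 then 3
  else if 18 ≤ r ∧ r ≤ 25 then 2
  else 1

def score_striking_distance_alt (best_rank : Option Int) (ranks : List (Option Int)) : Int :=
  ((best_rank :: ranks).filterMap id).foldl (fun acc r => max acc (rankScore r)) 1

-- ===== PRECONDITION & SPEC =====
def Spec_score_striking_distance (best_rank : Option Int) (ranks : List (Option Int)) (out : Int) : Prop := out = score_striking_distance_alt best_rank ranks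
instance (best_rank : Option Int) (ranks : List (Option Int)) (out : Int) : Decidable (Spec_score_striking_distance best_rank ranks out) := by unfold Spec_score_striking_distance; infer_instance

-- ===== CLAIM (what is proved, stated in full; the proofs are below) =====
def Claim_equal_score_striking_distance : Prop := ∀ (best_rank : Option Int) (ranks : List (Option Int)), Dom_score_striking_distance best_rank ranks → Spec_score_striking_distance best_rank ranks (score_striking_distance best_rank ranks)

-- ===== LEMMAS AND PROOFS =====

-- ===== VERDICT (by name: the statement is the Claim_ definition above) =====
theorem max_ladder (s3 s2 : Prop) [Decidable s3] [Decidable s2] (b3 b2 : Bool) (acc : Int) :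
    max (max acc (if s3 then (3:Int) else if s2 then 2 else 1))
        (if b3 then (3:Int) else if b2 then 2 else 1) =
      max acc (if (decide s3 || b3) then (3:Int) else if (decide s2 || b2) then 2 else 1) := by
  by_cases h3 : s3 <;> by_cases h2 : s2 <;> cases b3 <;> cases b2 <;>
    simp [h3, h2] <;> omega

theorem fold_max_score (l : List Int) (acc : Int) (h1 : 1 ≤ acc) :
    l.foldl (fun a r => max a (rankScore r)) acc =
      max acc (if l.any (fun r => decide (8 ≤ r ∧ r ≤ 17)) then 3
               else if l.any (fun r => decide (18 ≤ r ∧ r ≤ 25)) then 2 else 1) := by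
  induction l generalizing acc with
  | nil => simp; omega
  | cons x xs ih =>
    simp only [List.foldl_cons, List.any_cons]
    rw [ih (max acc (rankScore x)) (le_max_of_le_left h1)]
    unfold rankScore
    exact max_ladder _ _ _ _ _

theorem score_striking_distance_spec : Claim_equal_score_striking_distance := by
  intro br rs _
  unfold Spec_score_striking_distance score_striking_distance score_striking_distance_alt
  rw [fold_max_score _ 1 le_rfl]
  rcases h : (br :: rs).filterMap id with _ | ⟨x, xs⟩
  · simp
  · simp only [if_neg (List.cons_ne_nil x xs)]
    split_ifs <;> omega
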